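-- pv_equiv track=rewrite | github.com/9x25dillon/numbskull | neuro_symbolic_engine.py | _fibonacci_chunk
-- ===== SOURCE A (Python) =====
-- from typing import Any, Dict, List, Optional, Tuple
--
-- def _fibonacci_chunk(s: str) -> List[str]:
--     fib = [1, 1, 2, 3, 5, 8, 13, 21, 34, 55, 89]
--     chunks = []
--     pos = 0
--
--     for f in fib:
--         if pos >= len(s):
--             break
--         chunks.append(s[pos:pos+f])
--         pos += f
--
--     return chunks
-- ===== SOURCE B (Python) =====
-- from typing import Any, Dict, List, Optional, Tuple
--
-- def _fibonacci_chunk(s: str) -> List[str]: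
--     def go(t: str, a: int, b: int, k: int) -> List[str]:
--         if k == 0 or not t:
--             return []
--         return [t[:a]] + go(t[a:], b, a + b, k - 1)
--     return go(s, 1, 1, 11)
-- ===== Notes on version B (the rewrite author's own statement) =====
-- stated objective: alternative
-- what changed: Replaced the fixed fib-table loop with running position and break by a recursion that consumes the remaining string suffix, generating Fibonacci sizes on the fly from the pair (a,b) with a depth counter instead of any precomputed list or index state.
import Mathlib
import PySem

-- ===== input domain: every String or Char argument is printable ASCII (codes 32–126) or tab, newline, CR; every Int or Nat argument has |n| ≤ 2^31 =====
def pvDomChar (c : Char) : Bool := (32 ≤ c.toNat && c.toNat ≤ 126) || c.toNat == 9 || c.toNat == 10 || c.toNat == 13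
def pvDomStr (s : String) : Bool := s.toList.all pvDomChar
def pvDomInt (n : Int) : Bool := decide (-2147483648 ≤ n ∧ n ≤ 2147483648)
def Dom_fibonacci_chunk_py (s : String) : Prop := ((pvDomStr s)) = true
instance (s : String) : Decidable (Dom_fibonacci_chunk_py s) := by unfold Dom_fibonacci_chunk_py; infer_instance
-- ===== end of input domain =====

-- B replaces A's fixed fib-table loop with running position and break by a recursion that consumes
-- the remaining string suffix, generating the Fibonacci sizes on the fly from the pair (a,b)
-- with a depth counter (alternative decomposition, same cost).

-- ===== PORT A =====
def fibA : List Int := [1, 1, 2, 3, 5, 8, 13, 21, 34, 55, 89]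

def loopA (s : String) : List Int → List String → Int → List String
  | [], chunks, _ => chunks
  | f :: rest, chunks, pos =>
    if pos ≥ PySem.Str.len s then chunks
    else loopA s rest (chunks ++ [PySem.Str.slice s (some pos) (some (pos + f))]) (pos + f)

def fibonacci_chunk_py (s : String) : List String := loopA s fibA [] 0

-- ===== PORT B =====
-- go(t, a, b, k): if k == 0 or not t: []; else [t[:a]] + go(t[a:], b, a+b, k-1)
def goB : String → Int → Int → Nat → List String
  | _, _, _, 0 => []
  | t, a, b, Nat.succ k =>
    if t = "" then []
    else PySem.Str.slice t none (some a) :: goB (PySem.Str.slice t (some a) none) b (a + b) k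

def fibonacci_chunk_py_alt (s : String) : List String := goB s 1 1 11

-- ===== PRECONDITION & SPEC =====
def Spec_fibonacci_chunk_py (s : String) (out : List String) : Prop := out = fibonacci_chunk_py_alt s
instance (s : String) (out : List String) : Decidable (Spec_fibonacci_chunk_py s out) := by unfold Spec_fibonacci_chunk_py; infer_instance

-- ===== CLAIM (what is proved, stated in full; the proofs are below) =====
def Claim_equal_fibonacci_chunk_py : Prop := ∀ (s : String), Dom_fibonacci_chunk_py s → Spec_fibonacci_chunk_py s (fibonacci_chunk_py s)

-- ===== LEMMAS AND PROOFS =====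

-- (lo, hi) boundary pairs generated from a list of chunk lengths starting at pos
def pvPairs : Int → List Int → List (Int × Int)
  | _, [] => []
  | pos, f :: rest => (pos, pos + f) :: pvPairs (pos + f) rest

-- the Fibonacci size list B's pair recursion walks through
def pvGenFib : Int → Int → Nat → List Int
  | _, _, 0 => []
  | a, b, Nat.succ k => a :: pvGenFib b (a + b) k

lemma pvGenFib_nonneg (k : Nat) (a b : Int) (ha : 0 ≤ a) (hb : 0 ≤ b) :
    ∀ f ∈ pvGenFib a b k, 0 ≤ f := by
  induction k generalizing a b with
  | zero => simp [pvGenFib]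
  | succ k ih =>
    intro f hf
    simp only [pvGenFib, List.mem_cons] at hf
    rcases hf with rfl | hf
    · exact ha
    · exact ih b (a + b) hb (by omega) f hf

lemma pvPairs_filter_nil (L pos : Int) (fib : List Int)
    (hf : ∀ f ∈ fib, 0 ≤ f) (h : pos ≥ L) :
    (pvPairs pos fib).filter (fun p => decide (p.1 < L)) = [] := by
  induction fib generalizing pos with
  | nil => rfl
  | cons f rest ih =>
    have hf0 : 0 ≤ f := hf f (by simp)
    simp only [pvPairs, List.filter_cons]
    rw [if_neg (by simp only [decide_eq_true_eq]; omega)]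
    exact ih (pos + f) (fun g hg => hf g (by simp [hg])) (by omega)

lemma loopA_eq (s : String) (fib : List Int) (chunks : List String) (pos : Int)
    (hf : ∀ f ∈ fib, 0 ≤ f) :
    loopA s fib chunks pos = chunks ++
      ((pvPairs pos fib).filter (fun p => decide (p.1 < PySem.Str.len s))).map
        (fun p => PySem.Str.slice s (some p.1) (some p.2)) := by
  induction fib generalizing chunks pos with
  | nil => simp [loopA, pvPairs]
  | cons f rest ih =>
    simp only [loopA]
    by_cases h : pos ≥ PySem.Str.len s
    · rw [if_pos h, pvPairs_filter_nil _ pos _ hf h]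
      simp
    · rw [if_neg h, ih _ _ (fun g hg => hf g (by simp [hg]))]
      simp only [pvPairs, List.filter_cons]
      rw [if_pos (by simp only [decide_eq_true_eq]; omega)]
      simp

-- the suffix s[pos:] is empty iff pos has reached the end (0 ≤ pos)
lemma suffix_empty_iff (s : String) (pos : Int) (hpos : 0 ≤ pos) :
    PySem.Str.slice s (some pos) none = "" ↔ PySem.Str.len s ≤ pos := by
  rw [← String.toList_inj]
  simp only [pysem, PySem.List.slice_from _ hpos, String.toList_empty, List.drop_eq_nil_iff]
  omega

-- (s[pos:])[:a] = s[pos:pos+a]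
lemma slice_take_comp (s : String) (pos a : Int) (hpos : 0 ≤ pos) (ha : 0 ≤ a) :
    PySem.Str.slice (PySem.Str.slice s (some pos) none) none (some a)
      = PySem.Str.slice s (some pos) (some (pos + a)) := by
  apply String.toList_inj.mp
  simp only [pysem, PySem.List.slice_from _ hpos, PySem.List.slice_to _ ha,
    PySem.List.slice_toNat _ hpos (by omega : (0:Int) ≤ pos + a)]
  congr 1
  omega

-- (s[pos:])[a:] = s[pos+a:]
lemma slice_drop_comp (s : String) (pos a : Int) (hpos : 0 ≤ pos) (ha : 0 ≤ a) :
    PySem.Str.slice (PySem.Str.slice s (some pos) none) (some a) none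
      = PySem.Str.slice s (some (pos + a)) none := by
  apply String.toList_inj.mp
  simp only [pysem, PySem.List.slice_from _ hpos, PySem.List.slice_from _ ha,
    PySem.List.slice_from _ (by omega : (0:Int) ≤ pos + a), List.drop_drop]
  congr 1
  omega

lemma goB_eq (s : String) (k : Nat) (a b pos : Int)
    (ha : 0 ≤ a) (hb : 0 ≤ b) (hpos : 0 ≤ pos) :
    goB (PySem.Str.slice s (some pos) none) a b k =
      ((pvPairs pos (pvGenFib a b k)).filter (fun p => decide (p.1 < PySem.Str.len s))).map
        (fun p => PySem.Str.slice s (some p.1) (some p.2)) := by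
  induction k generalizing a b pos with
  | zero => simp [goB, pvGenFib, pvPairs]
  | succ k ih =>
    simp only [goB]
    by_cases h : PySem.Str.slice s (some pos) none = ""
    · rw [if_pos h]
      have hend : PySem.Str.len s ≤ pos := (suffix_empty_iff s pos hpos).mp h
      rw [pvPairs_filter_nil _ pos _ (pvGenFib_nonneg _ a b ha hb) (by omega)]
      simp
    · rw [if_neg h]
      have hlt : pos < PySem.Str.len s := by
        by_contra hc
        exact h ((suffix_empty_iff s pos hpos).mpr (by omega))
      rw [slice_take_comp s pos a hpos ha, slice_drop_comp s pos a hpos ha,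
        ih b (a + b) (pos + a) hb (by omega) (by omega)]
      simp only [pvGenFib, pvPairs, List.filter_cons]
      rw [if_pos (by simp only [decide_eq_true_eq]; omega)]
      simp

-- s = s[0:]
lemma slice_zero_self (s : String) : PySem.Str.slice s (some 0) none = s := by
  apply String.toList_inj.mp
  simp [pysem, PySem.List.slice_from _ (le_refl (0:Int))]

lemma pvGenFib_eq_fibA : pvGenFib 1 1 11 = fibA := by decide

-- ===== VERDICT (by name: the statement is the Claim_ definition above) =====
theorem fibonacci_chunk_py_spec : Claim_equal_fibonacci_chunk_py := by
  intro s _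
  unfold Spec_fibonacci_chunk_py fibonacci_chunk_py fibonacci_chunk_py_alt
  conv_rhs => rw [← slice_zero_self s]
  rw [loopA_eq s fibA [] 0 (by decide),
    goB_eq s 11 1 1 0 (by omega) (by omega) (le_refl 0), pvGenFib_eq_fibA]
  simp
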